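-- pv_equiv track=rewrite | github.com/sbyakod/TJHSST | Cryptography/Vigenere-Cipher/main.py | make_cosets
-- ===== SOURCE A (Python) =====
-- def make_cosets(text, n):
--   array = [""] * n
--   count = 0
--   for char in text:
--     array[count] += char
--
--     count += 1
--     if count >= n:
--       count = 0
--
--   return array
-- ===== SOURCE B (Python) =====
-- def make_cosets(text, n):
--   return [text[i::n] for i in range(n)]
-- ===== Notes on version B (the rewrite author's own statement) =====
-- stated objective: idiomatic
-- what changed: Replaces the round-robin loop that grows each bucket by repeated string concatenation with n strided slices text[i::n], one per coset.
import Mathlib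
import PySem

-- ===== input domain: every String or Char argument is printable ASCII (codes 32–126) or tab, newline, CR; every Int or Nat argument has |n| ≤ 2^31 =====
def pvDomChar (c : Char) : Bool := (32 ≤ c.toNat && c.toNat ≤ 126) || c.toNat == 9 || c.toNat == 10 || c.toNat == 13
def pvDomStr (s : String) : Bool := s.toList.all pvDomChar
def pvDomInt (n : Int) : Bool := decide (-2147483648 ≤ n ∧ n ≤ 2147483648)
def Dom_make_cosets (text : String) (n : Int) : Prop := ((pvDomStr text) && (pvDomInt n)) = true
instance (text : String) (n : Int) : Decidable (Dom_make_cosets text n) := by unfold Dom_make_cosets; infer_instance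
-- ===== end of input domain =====

-- B replaces A's round-robin loop (repeated string concatenation into n buckets) by n strided
-- slices text[i::n]; return values proved equal wherever A returns (Pre_: n ≥ 1 or text empty).

-- ===== PORT A =====
-- Strings in the accumulator are modelled as List Char (exact on the ASCII domain); String.ofList at the end.
def make_cosets (text : String) (n : Int) : List String :=
  let array := PySem.List.pyRepeat [([] : List Char)] n     -- [""] * n
  let r := text.toList.foldl
    (fun (st : List (List Char) × Int) (ch : Char) =>
      -- array[count] += char  (pyGetD/pySetD total forms: count is in range under Pre_)
      let arr := PySem.List.pySetD st.1 st.2 (PySem.List.pyGetD st.1 st.2 [] ++ [ch])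
      let count := st.2 + 1
      (arr, if count ≥ n then (0 : Int) else count))
    (array, 0)
  r.1.map (fun cs => String.ofList cs)

-- ===== PORT B =====
-- [text[i::n] for i in range(n)]; slice? is none only for step n = 0, but range(0) is empty,
-- so the .getD [] default is never reached.
def make_cosets_alt (text : String) (n : Int) : List String :=
  (PySem.List.pyRange 0 n 1).map (fun i =>
    String.ofList ((PySem.List.slice? text.toList (some i) none n).getD []))

-- ===== PRECONDITION & SPEC =====
-- Pre_ excludes exactly the inputs where A raises IndexError: n ≤ 0 with nonempty text.
def Pre_make_cosets (text : String) (n : Int) : Prop := 1 ≤ n ∨ text = ""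
instance (text : String) (n : Int) : Decidable (Pre_make_cosets text n) := by
  unfold Pre_make_cosets; infer_instance
def pvWitness_make_cosets : String × Int := ("attackatdawn", 3)

def Spec_make_cosets (text : String) (n : Int) (out : List String) : Prop := out = make_cosets_alt text n
instance (text : String) (n : Int) (out : List String) : Decidable (Spec_make_cosets text n out) := by
  unfold Spec_make_cosets; infer_instance

-- ===== CLAIM (what is proved, stated in full; the proofs are below) =====
def Claim_equal_make_cosets : Prop := ∀ (text : String) (n : Int), Dom_make_cosets text n → Pre_make_cosets text n → Spec_make_cosets text n (make_cosets text n)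
-- ===== LEMMAS AND PROOFS =====

-- Common spine: the characters at positions 0, nn, 2·nn, … of a list.

def takeEvery (nn : Nat) : List Char → List Char
  | [] => []
  | c :: t => c :: takeEvery nn (t.drop (nn - 1))
termination_by l => l.length
decreasing_by simp only [List.length_cons, List.length_drop]; omega

-- A's selection: the characters appended to bucket j by A's loop, count cycling from c.
def sel (nn : Nat) : List Char → Nat → Nat → List Char
  | [], _, _ => []
  | x :: t, c, j =>
    let c' := if c + 1 ≥ nn then 0 else c + 1
    if c = j then x :: sel nn t c' j else sel nn t c' j

lemma sel_eq_takeEvery (nn : Nat) (hnn : 0 < nn) :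
    ∀ (l : List Char) (c j : Nat), c < nn → j < nn →
      sel nn l c j = takeEvery nn (l.drop (if c ≤ j then j - c else nn + j - c)) := by
  intro l
  induction l with
  | nil => intro c j _ _; simp [sel, takeEvery]
  | cons x t ih =>
    intro c j hc hj
    simp only [sel]
    by_cases hcj : c = j
    · subst hcj
      have hd : (if c ≤ c then c - c else nn + c - c) = 0 := by simp
      rw [hd, if_pos rfl]
      simp only [List.drop_zero, takeEvery]
      congr 1
      by_cases h1 : c + 1 ≥ nn
      · rw [if_pos h1, ih 0 c hnn hc]
        have : (if 0 ≤ c then c - 0 else nn + c - 0) = nn - 1 := by split_ifs <;> omega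
        rw [this]
      · rw [if_neg h1, ih (c+1) c (by omega) hc]
        have : (if c + 1 ≤ c then c - (c+1) else nn + c - (c+1)) = nn - 1 := by split_ifs <;> omega
        rw [this]
    · rw [if_neg hcj]
      set d := (if c ≤ j then j - c else nn + j - c) with hdd
      have hd1 : 1 ≤ d := by rw [hdd]; split_ifs <;> omega
      obtain ⟨d', hd'⟩ : ∃ d', d = d' + 1 := ⟨d - 1, by omega⟩
      rw [hd', List.drop_succ_cons]
      by_cases h1 : c + 1 ≥ nn
      · rw [if_pos h1, ih 0 j hnn hj]
        have : (if 0 ≤ j then j - 0 else nn + j - 0) = d' := by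
          rw [hdd] at hd'; split_ifs at hd' ⊢ <;> omega
        rw [this]
      · rw [if_neg h1, ih (c+1) j (by omega) hj]
        have : (if c + 1 ≤ j then j - (c+1) else nn + j - (c+1)) = d' := by
          rw [hdd] at hd'; split_ifs at hd' ⊢ <;> omega
        rw [this]

-- A's loop, characterized pointwise.
lemma foldA_eq (nn : Nat) (hnn : 0 < nn) :
    ∀ (l : List Char) (arr : List (List Char)) (c : Nat), arr.length = nn → c < nn →
      (l.foldl
        (fun (st : List (List Char) × Int) (ch : Char) =>
          (PySem.List.pySetD st.1 st.2 (PySem.List.pyGetD st.1 st.2 [] ++ [ch]),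
            if st.2 + 1 ≥ (nn : Int) then (0 : Int) else st.2 + 1))
        (arr, (c : Int))).1
      = arr.mapIdx (fun j s => s ++ sel nn l c j) := by
  intro l
  induction l with
  | nil =>
    intro arr c ha hc
    simp only [List.foldl_nil]
    apply List.ext_getElem (by simp)
    intro j h1 h2
    simp [sel]
  | cons x t ih =>
    intro arr c ha hc
    simp only [List.foldl_cons]
    have hget : PySem.List.pyGetD arr (c : Int) ([] : List Char) = arr.getD c [] := by
      simp [PySem.List.pyGetD_natCast]
    have hset : PySem.List.pySetD arr (c : Int) (arr.getD c [] ++ [x]) = arr.set c (arr.getD c [] ++ [x]) := by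
      simp [PySem.List.pySetD_natCast]
    rw [hget, hset]
    have hbranch : (if (c : Int) + 1 ≥ (nn : Int) then (0 : Int) else (c : Int) + 1)
        = (((if c + 1 ≥ nn then 0 else c + 1) : Nat) : Int) := by
      split_ifs <;> push_cast <;> omega
    rw [hbranch, ih _ _ (by simp [ha]) (by split_ifs <;> omega)]
    apply List.ext_getElem (by simp)
    intro j h1 h2
    simp only [List.getElem_mapIdx, List.getElem_set]
    have hj : j < nn := by simpa [ha] using h2
    by_cases hjc : j = c
    · subst hjc
      have hgetd : arr.getD j [] = arr[j] := List.getD_eq_getElem arr [] (by omega)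
      simp [sel, List.getElem?_eq_getElem (show j < arr.length by omega)]
    · have hcj : ¬ c = j := fun h => hjc h.symm
      simp [sel, hcj]

-- The element count of the slice, as slice? computes it.
def cnt (nn : Nat) (m : List Char) : Nat := (((m.length : Int) + nn - 1) / nn).toNat

lemma cnt_cons (nn : Nat) (hnn : 0 < nn) (x : Char) (t : List Char) :
    cnt nn (x :: t) = cnt nn (t.drop (nn - 1)) + 1 := by
  unfold cnt
  simp only [List.length_cons, List.length_drop]
  by_cases h : t.length + 1 ≤ nn
  · have r0 : ((((t.length - (nn - 1)) : Nat) : Int) + nn - 1) / nn = 0 := by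
      rw [show (t.length - (nn - 1)) = 0 from by omega]
      exact Int.ediv_eq_zero_of_lt (by omega) (by push_cast; omega)
    have r1 : ((((t.length + 1) : Nat) : Int) + nn - 1) / nn = 1 := by
      rw [show ((((t.length + 1) : Nat) : Int) + nn - 1) = (t.length : Int) + 1 * nn by push_cast; ring]
      rw [Int.add_mul_ediv_right _ _ (show (nn : Int) ≠ 0 by omega)]
      rw [Int.ediv_eq_zero_of_lt (by omega) (by omega)]
      omega
    rw [r0, r1]
    rfl
  · have e : ((((t.length + 1) : Nat) : Int) + nn - 1)
        = (((t.length - (nn - 1) : Nat) : Int) + nn - 1) + 1 * nn := by omega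
    rw [e, Int.add_mul_ediv_right _ _ (show (nn : Int) ≠ 0 by omega)]
    have h3 : 0 ≤ (((t.length - (nn - 1) : Nat) : Int) + nn - 1) / nn :=
      Int.ediv_nonneg (by omega) (by omega)
    omega

lemma core (nn : Nat) (hnn : 0 < nn) :
    ∀ (N : Nat) (m : List Char), m.length ≤ N →
      List.filterMap (fun k : Nat => m[nn * k]?) (List.range (cnt nn m)) = takeEvery nn m := by
  intro N
  induction N with
  | zero =>
    intro m hm
    have : m = [] := List.eq_nil_of_length_eq_zero (by omega)
    subst this
    simp [takeEvery]
  | succ N ih =>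
    intro m hm
    match m with
    | [] => simp [takeEvery]
    | x :: t =>
      rw [cnt_cons nn hnn, List.range_succ_eq_map, takeEvery]
      simp only [List.filterMap_cons, Nat.mul_zero, List.getElem?_cons_zero,
        List.filterMap_map]
      congr 1
      rw [← ih (t.drop (nn - 1)) (by simp at hm ⊢; omega)]
      apply List.filterMap_congr
      intro k _
      simp only [Function.comp_apply]
      rw [show nn * (k + 1) = ((nn - 1) + nn * k) + 1 by rw [Nat.mul_succ]; omega]
      rw [List.getElem?_cons_succ, List.getElem?_drop]

lemma slice?_from_step (l : List Char) (nn i : Nat) (hnn : 0 < nn) :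
    PySem.List.slice? l (some (i : Int)) none (nn : Int) = some (takeEvery nn (l.drop i)) := by
  have hstep0 : ¬ ((nn : Int) = 0) := by omega
  have hstepneg : ¬ ((nn : Int) < 0) := by omega
  have hineg : ¬ ((i : Int) < 0) := by omega
  simp only [PySem.List.slice?, PySem.List.sliceIndices, if_neg hstep0, if_neg hstepneg,
    if_neg hineg, if_pos (show (0:Int) < nn by omega)]
  congr 1
  have hmin : min (i : Int) (l.length : Int) = ((min i l.length : Nat) : Int) := by
    push_cast; rfl
  set s : Nat := min i l.length with hs
  have hdrop : (l.drop s).length = l.length - s := by simp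
  have hcount : (if ((s : Int) < (l.length : Int)) then
      (((l.length : Int) - (s : Int) + (nn : Int) - 1) / (nn : Int)).toNat else 0)
      = cnt nn (l.drop s) := by
    unfold cnt
    rw [hdrop]
    by_cases hsl : (s : Int) < (l.length : Int)
    · rw [if_pos hsl]
      congr 2
      omega
    · rw [if_neg hsl]
      have : l.length - s = 0 := by omega
      rw [this]
      have := Int.ediv_eq_zero_of_lt (show (0:Int) ≤ ((0:Nat):Int) + nn - 1 by omega)
        (show ((0:Nat):Int) + nn - 1 < nn by omega)
      omega
  rw [hmin, hcount]
  have hfun : ∀ k ∈ List.range (cnt nn (l.drop s)),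
      (l[(( (s:Nat) : Int) + (nn : Int) * (k : Int)).toNat]? : Option Char) = (l.drop s)[nn * k]? := by
    intro k _
    have e : (((s : Nat) : Int) + (nn : Int) * (k : Int)) = ((s + nn * k : Nat) : Int) := by
      push_cast; ring
    rw [e, Int.toNat_natCast, List.getElem?_drop]
  rw [List.filterMap_congr hfun, core nn hnn (l.drop s).length _ le_rfl]
  by_cases hil : i ≤ l.length
  · have : s = i := by omega
    rw [this]
  · have h1 : l.drop s = [] := by
      apply List.drop_eq_nil_of_le; omega
    have h2 : l.drop i = [] := by
      apply List.drop_eq_nil_of_le; omega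
    rw [h1, h2]

lemma main_eq (text : String) (n : Int) (hpre : 1 ≤ n ∨ text = "") :
    make_cosets text n = make_cosets_alt text n := by
  rcases Decidable.em (1 ≤ n) with hn | hn
  · obtain ⟨nn, rfl⟩ : ∃ nn : Nat, n = (nn : Int) :=
      ⟨n.toNat, (Int.toNat_of_nonneg (by omega)).symm⟩
    have hnn : 0 < nn := by omega
    set l := text.toList with hl
    -- A side: characterize the round-robin fold
    unfold make_cosets
    have hA := foldA_eq nn hnn l (List.replicate nn []) 0 (by simp) hnn
    push_cast at hA
    simp only [PySem.List.pyRepeat_singleton, Int.toNat_natCast]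
    rw [hA]
    -- B side: characterize the strided slices
    unfold make_cosets_alt
    rw [PySem.List.pyRange_one]
    simp only [Int.sub_zero, Int.toNat_natCast, List.map_map]
    apply List.ext_getElem (by simp)
    intro j h1 h2
    simp only [List.getElem_map, List.getElem_mapIdx, List.getElem_range, List.getElem_replicate,
      Function.comp_apply,] at h1 h2 ⊢
    have hj : j < nn := by simpa using h2
    rw [show ((0 : Int) + (j : Int)) = ((j : Nat) : Int) by omega]
    rw [slice?_from_step l nn j hnn]
    simp only [Option.getD_some, List.nil_append]
    rw [sel_eq_takeEvery nn hnn l 0 j hnn hj]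
    simp
  · have htext : text = "" := by tauto
    subst htext
    have hn' : n ≤ 0 := by omega
    unfold make_cosets make_cosets_alt
    simp [PySem.List.pyRepeat_singleton, PySem.List.pyRange_one_eq_nil (by omega : n ≤ 0),
      Int.toNat_of_nonpos hn']

-- ===== VERDICT (by name: the statement is the Claim_ definition above) =====
theorem make_cosets_spec : Claim_equal_make_cosets := by
  intro text n _ hpre
  unfold Spec_make_cosets
  exact main_eq text n hpre
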